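-- pv_equiv track=rewrite | github.com/ym-dskr/paper_picker | src/paper_fetcher.py | _evaluate_energy_keywords
-- ===== SOURCE A (Python) =====
-- def _evaluate_energy_keywords(text: str) -> float:
--     """エネルギー・電力関連キーワードの評価."""
--     energy_keywords = {
--         # 高価値キーワード（30点）
--         'renewable energy': 30, 'smart grid': 30, 'energy storage': 30,
--         'demand response': 25, 'microgrid': 25, 'power system': 25,
--         # 中価値キーワード（15-20点）
--         'solar power': 20, 'wind power': 20, 'energy management': 20,
--         'load forecasting': 18, 'power forecasting': 18,
--         'energy efficiency': 15, 'grid stability': 15,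
--         # 基本キーワード（10点）
--         'electricity': 10, 'power': 8, 'energy': 5
--     }
--
--     max_score = 0
--     for keyword, points in energy_keywords.items():
--         if keyword in text:
--             max_score = max(max_score, points)
--
--     return max_score
-- ===== SOURCE B (Python) =====
-- def _evaluate_energy_keywords(text: str) -> float:
--     """Score tiers in descending order; return the first tier whose any keyword occurs."""
--     tiers = [
--         (30, ['renewable energy', 'smart grid', 'energy storage']),
--         (25, ['demand response', 'microgrid', 'power system']),
--         (20, ['solar power', 'wind power', 'energy management']),
--         (18, ['load forecasting', 'power forecasting']),
--         (15, ['energy efficiency', 'grid stability']),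
--         (10, ['electricity']),
--         (8, ['power']),
--         (5, ['energy']),
--     ]
--     for points, keywords in tiers:
--         if any(k in text for k in keywords):
--             return points
--     return 0
-- ===== Notes on version B (the rewrite author's own statement) =====
-- stated objective: alternative
-- what changed: Replaces the scan-all-keywords-and-take-max fold with a structurally different pass over score tiers sorted descending: the first tier containing any matching keyword is returned immediately (short-circuit), 0 if none.
import Mathlib
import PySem

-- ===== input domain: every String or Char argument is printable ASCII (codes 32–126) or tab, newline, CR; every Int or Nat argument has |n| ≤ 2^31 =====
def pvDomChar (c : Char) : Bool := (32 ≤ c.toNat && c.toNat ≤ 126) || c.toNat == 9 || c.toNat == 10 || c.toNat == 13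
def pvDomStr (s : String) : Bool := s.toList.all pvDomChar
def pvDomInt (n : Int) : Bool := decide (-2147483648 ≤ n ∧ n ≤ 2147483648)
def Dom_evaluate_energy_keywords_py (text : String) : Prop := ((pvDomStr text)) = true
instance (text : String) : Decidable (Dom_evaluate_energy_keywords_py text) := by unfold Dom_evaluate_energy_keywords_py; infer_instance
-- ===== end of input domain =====

-- B replaces A's scan-all-and-take-max fold by a first-match scan over descending score tiers; alternative decomposition, same values.

-- ===== PORT A =====
-- the dict literal of A, in insertion order (keys, points)
def pvEnergyKeywords : List (String × Int) :=
  [("renewable energy", 30), ("smart grid", 30), ("energy storage", 30),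
   ("demand response", 25), ("microgrid", 25), ("power system", 25),
   ("solar power", 20), ("wind power", 20), ("energy management", 20),
   ("load forecasting", 18), ("power forecasting", 18),
   ("energy efficiency", 15), ("grid stability", 15),
   ("electricity", 10), ("power", 8), ("energy", 5)]

def evaluate_energy_keywords_py (text : String) : Int :=
  pvEnergyKeywords.foldl
    (fun max_score kp => if PySem.Str.isIn kp.1 text then max max_score kp.2 else max_score) 0

-- ===== PORT B =====
-- score tiers, descending points, each with its keyword group
def pvTiers : List (Int × List String) :=
  [(30, ["renewable energy", "smart grid", "energy storage"]),
   (25, ["demand response", "microgrid", "power system"]),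
   (20, ["solar power", "wind power", "energy management"]),
   (18, ["load forecasting", "power forecasting"]),
   (15, ["energy efficiency", "grid stability"]),
   (10, ["electricity"]),
   (8, ["power"]),
   (5, ["energy"])]

-- the for-loop of B: return the first tier any of whose keywords occurs in text
def pvTierScan (text : String) : List (Int × List String) → Int
  | [] => 0
  | (points, keywords) :: rest =>
      if keywords.any (fun k => PySem.Str.isIn k text) then points else pvTierScan text rest

def evaluate_energy_keywords_py_alt (text : String) : Int :=
  pvTierScan text pvTiers

-- ===== PRECONDITION & SPEC =====
def Spec_evaluate_energy_keywords_py (text : String) (out : Int) : Prop := out = evaluate_energy_keywords_py_alt text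
instance (text : String) (out : Int) : Decidable (Spec_evaluate_energy_keywords_py text out) := by unfold Spec_evaluate_energy_keywords_py; infer_instance

-- ===== CLAIM (what is proved, stated in full; the proofs are below) =====
def Claim_equal_evaluate_energy_keywords_py : Prop := ∀ (text : String), Dom_evaluate_energy_keywords_py text → Spec_evaluate_energy_keywords_py text (evaluate_energy_keywords_py text)

-- ===== LEMMAS AND PROOFS =====

-- A's step function, abbreviated for the lemmas
def pvStep (text : String) : Int → String × Int → Int :=
  fun max_score kp => if PySem.Str.isIn kp.1 text then max max_score kp.2 else max_score

-- flatten a tier list into A's flat (keyword, points) list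
def pvFlat (T : List (Int × List String)) : List (String × Int) :=
  T.flatMap (fun t => t.2.map (fun k => (k, t.1)))

theorem pvFoldl_map_tier (text : String) (a p : Int) (ks : List String) :
    (ks.map (fun k => (k, p))).foldl (pvStep text) a =
      if ks.any (fun k => PySem.Str.isIn k text) then max a p else a := by
  induction ks generalizing a with
  | nil => simp
  | cons k tl ih =>
      simp only [List.map_cons, List.foldl_cons, List.any_cons, pvStep]
      by_cases h : PySem.Str.isIn k text = true
      · simp only [h, Bool.true_or, ih]
        split_ifs <;> omega
      · simp only [h, Bool.false_or, ih]
        simp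

theorem pvFoldl_dominated (text : String) (a : Int) (T : List (Int × List String))
    (hdom : ∀ t ∈ T, t.1 ≤ a) :
    (pvFlat T).foldl (pvStep text) a = a := by
  induction T with
  | nil => simp [pvFlat]
  | cons t tl ih =>
      simp only [pvFlat, List.flatMap_cons, List.foldl_append] at *
      rw [pvFoldl_map_tier]
      have h1 : t.1 ≤ a := hdom t (by simp)
      have hmax : max a t.1 = a := by omega
      split_ifs <;> simp_all

theorem pvFoldl_eq_tierScan (text : String) (T : List (Int × List String))
    (hnn : ∀ t ∈ T, 0 ≤ t.1)
    (hsort : T.Pairwise (fun x y => y.1 ≤ x.1)) :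
    (pvFlat T).foldl (pvStep text) 0 = pvTierScan text T := by
  induction T with
  | nil => simp [pvFlat, pvTierScan]
  | cons t tl ih =>
      obtain ⟨p, ks⟩ := t
      simp only [pvFlat, List.flatMap_cons, List.foldl_append, pvTierScan]
      rw [pvFoldl_map_tier]
      rw [List.pairwise_cons] at hsort
      by_cases h : ks.any (fun k => PySem.Str.isIn k text) = true
      · have hp : (0 : Int) ≤ p := hnn (p, ks) (by simp)
        rw [if_pos h, if_pos h]
        have : max (0 : Int) p = p := by omega
        rw [this]
        exact pvFoldl_dominated text p tl (fun u hu => hsort.1 u hu)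
      · rw [if_neg h, if_neg h]
        exact ih (fun u hu => hnn u (by simp [hu])) hsort.2

-- ===== VERDICT (by name: the statement is the Claim_ definition above) =====
theorem evaluate_energy_keywords_py_spec : Claim_equal_evaluate_energy_keywords_py := by
  intro text _
  show evaluate_energy_keywords_py text = evaluate_energy_keywords_py_alt text
  have hflat : pvEnergyKeywords = pvFlat pvTiers := by decide
  have hstep : evaluate_energy_keywords_py text =
      (pvFlat pvTiers).foldl (pvStep text) 0 := by
    rw [evaluate_energy_keywords_py, hflat]; rfl
  rw [hstep, evaluate_energy_keywords_py_alt]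
  exact pvFoldl_eq_tierScan text pvTiers (by decide) (by decide)
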